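-- pv_equiv track=rewrite | github.com/Kostyan89/HW24 | functions.py | limitation
-- ===== SOURCE A (Python) =====
-- from typing import Iterator
--
-- def limitation(it: Iterator, limit: int) -> Iterator:
--     i = 0
--     for item in it:
--         if i < limit:
--             yield item
--         else:
--             break
--         i += 1
-- ===== SOURCE B (Python) =====
-- def limitation(it, limit):
--     # Staged: materialize the iterator, then yield the slice [:max(0, limit)].
--     # Same yielded values as the original; differs in consumption (exhausts `it`).
--     buf = list(it)
--     yield from buf[:max(0, limit)]
-- ===== Notes on version B (the rewrite author's own statement) =====
-- stated objective: alternative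
-- what changed: B replaces the counting generator loop (if i < limit / break / i += 1) with two stages: materialize the iterator into a list, then yield its slice [:max(0, limit)]; no per-item counter or branch remains. Equivalence is about the yielded values only: B exhausts the source iterator where A stops early.
import Mathlib
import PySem

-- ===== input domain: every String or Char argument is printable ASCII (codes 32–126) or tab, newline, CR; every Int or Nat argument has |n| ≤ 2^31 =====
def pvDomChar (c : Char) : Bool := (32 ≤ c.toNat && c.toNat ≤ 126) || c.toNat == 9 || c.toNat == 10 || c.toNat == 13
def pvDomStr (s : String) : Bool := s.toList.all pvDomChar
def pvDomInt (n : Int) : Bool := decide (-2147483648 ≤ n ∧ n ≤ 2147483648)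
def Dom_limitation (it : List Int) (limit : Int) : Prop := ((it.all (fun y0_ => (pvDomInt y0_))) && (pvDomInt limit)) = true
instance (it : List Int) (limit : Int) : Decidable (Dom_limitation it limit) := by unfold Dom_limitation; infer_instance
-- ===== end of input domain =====

-- B materializes the iterator and yields the slice [:max(0, limit)] instead of counting with if/break;
-- equivalence is about the yielded values only (B exhausts the source iterator where A stops early).

-- ===== PORT A =====
-- for item in it: if i < limit: yield item else: break; i += 1
def limitationGo (limit : Int) : List Int → Int → List Int
  | [], _ => []
  | x :: xs, i => if i < limit then x :: limitationGo limit xs (i + 1) else []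

def limitation (it : List Int) (limit : Int) : List Int :=
  limitationGo limit it 0

-- ===== PORT B =====
-- buf = list(it); yield from buf[:max(0, limit)]
def limitation_alt (it : List Int) (limit : Int) : List Int :=
  PySem.List.slice it none (some (max 0 limit))

-- ===== PRECONDITION & SPEC =====
def Spec_limitation (it : List Int) (limit : Int) (out : List Int) : Prop := out = limitation_alt it limit
instance (it : List Int) (limit : Int) (out : List Int) : Decidable (Spec_limitation it limit out) := by unfold Spec_limitation; infer_instance

-- ===== CLAIM (what is proved, stated in full; the proofs are below) =====
def Claim_equal_limitation : Prop := ∀ (it : List Int) (limit : Int), Dom_limitation it limit → Spec_limitation it limit (limitation it limit)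

-- ===== LEMMAS AND PROOFS =====
theorem limitationGo_eq_take (limit : Int) (it : List Int) :
    ∀ i : Int, limitationGo limit it i = it.take (limit - i).toNat := by
  induction it with
  | nil => intro i; simp [limitationGo]
  | cons x xs ih =>
    intro i
    by_cases h : i < limit
    · have hn : (limit - i).toNat = (limit - (i + 1)).toNat + 1 := by omega
      simp [limitationGo, h, hn, ih (i + 1)]
    · have hn : (limit - i).toNat = 0 := by omega
      simp [limitationGo, h, hn]

-- ===== VERDICT (by name: the statement is the Claim_ definition above) =====
theorem limitation_spec : Claim_equal_limitation := by
  intro it limit _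
  unfold Spec_limitation limitation limitation_alt
  have h : (max 0 limit) = ((max 0 limit).toNat : Int) := by omega
  rw [h, PySem.List.slice_to_natCast]
  have h2 : (max 0 limit).toNat = (limit - 0).toNat := by omega
  rw [h2, ← limitationGo_eq_take]
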